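-- pv_equiv track=rewrite | github.com/SerFrasca/SnagPy | ASTROTIME.py | leap_seconds
-- ===== SOURCE A (Python) =====
-- def leap_seconds(mjd):
--     '''
--     leap seconds at mjd
--     independent list (see also astropy function)
--     we put 0 leapswconds at 1 January 1972
--     '''
--
--     leaptimes=[]
--
--     leaptimes.append(41317)
--     leaptimes.append(41499)
--     leaptimes.append(41683)
--     leaptimes.append(42048)
--     leaptimes.append(42413)
--     leaptimes.append(42778)
--     leaptimes.append(43144)
--     leaptimes.append(43509)
--     leaptimes.append(43874)
--
--     leaptimes.append(44786)
--     leaptimes.append(45151)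
--     leaptimes.append(45516)
--     leaptimes.append(46247)
--     leaptimes.append(47161)
--     leaptimes.append(47892)
--     leaptimes.append(48257)
--     leaptimes.append(48804)
--     leaptimes.append(49169)
--     leaptimes.append(49534)
--     leaptimes.append(50083)
--     leaptimes.append(50630)
--     leaptimes.append(51179)
--     leaptimes.append(53736)
--     leaptimes.append(54832)
--     leaptimes.append(56109)
--     leaptimes.append(57204)
--     leaptimes.append(57754)
--
--     ii=0
--     for tt in leaptimes:
--         if mjd < tt:
--             break
--         ii+=1
--
--     return ii
-- ===== SOURCE B (Python) =====
-- _LEAPTIMES = (41317, 41499, 41683, 42048, 42413, 42778, 43144, 43509, 43874,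
--               44786, 45151, 45516, 46247, 47161, 47892, 48257, 48804, 49169,
--               49534, 50083, 50630, 51179, 53736, 54832, 56109, 57204, 57754)
--
--
-- def leap_seconds(mjd):
--     '''
--     leap seconds at mjd: number of leap-second epochs <= mjd,
--     found by binary search over the sorted constant table
--     '''
--     lo, hi = 0, len(_LEAPTIMES)
--     while lo < hi:
--         mid = (lo + hi) // 2
--         if mjd < _LEAPTIMES[mid]:
--             hi = mid
--         else:
--             lo = mid + 1
--     return lo
-- ===== Notes on version B (the rewrite author's own statement) =====
-- stated objective: alternative
-- what changed: Replaces A's linear scan with break over the incrementally appended list by a binary search (bisect_right by hand) over the same sorted constant table.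
import Mathlib
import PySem

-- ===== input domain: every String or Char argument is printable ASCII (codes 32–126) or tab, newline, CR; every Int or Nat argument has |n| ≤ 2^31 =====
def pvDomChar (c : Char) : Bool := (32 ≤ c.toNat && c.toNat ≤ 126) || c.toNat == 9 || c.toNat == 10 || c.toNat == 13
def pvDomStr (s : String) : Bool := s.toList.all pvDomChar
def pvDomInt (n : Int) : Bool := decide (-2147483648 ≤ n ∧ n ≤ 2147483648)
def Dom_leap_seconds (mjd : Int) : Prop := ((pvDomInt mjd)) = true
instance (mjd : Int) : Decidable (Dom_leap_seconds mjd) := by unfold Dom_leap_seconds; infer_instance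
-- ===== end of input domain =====

-- B replaces A's linear scan-with-break by a binary search over the same sorted constant table (alternative algorithm; same fixed 27-entry table).


-- ===== PORT A =====
-- A's leaptimes list (built in Python by successive appends to [])
def leaptimesA : List Int :=
  [41317, 41499, 41683, 42048, 42413, 42778, 43144, 43509, 43874,
   44786, 45151, 45516, 46247, 47161, 47892, 48257, 48804, 49169,
   49534, 50083, 50630, 51179, 53736, 54832, 56109, 57204, 57754]

-- the 'for tt in leaptimes: if mjd < tt: break ; ii += 1' loop
def loopA (mjd : Int) : List Int → Int → Int
  | [], ii => ii
  | t :: ts, ii => if mjd < t then ii else loopA mjd ts (ii + 1)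

def leap_seconds (mjd : Int) : Int := loopA mjd leaptimesA 0

-- ===== PORT B =====
-- Source B's constant table _LEAPTIMES
def leapTableB : List Int :=
  [41317, 41499, 41683, 42048, 42413, 42778, 43144, 43509, 43874,
   44786, 45151, 45516, 46247, 47161, 47892, 48257, 48804, 49169,
   49534, 50083, 50630, 51179, 53736, 54832, 56109, 57204, 57754]

-- Source B's while-loop binary search; lo, hi are indices into the table (always in range)
def bsearchB (mjd : Int) (lo hi : Nat) : Nat :=
  if _h : lo < hi then
    if mjd < leapTableB.getD ((lo + hi) / 2) 0 then
      bsearchB mjd lo ((lo + hi) / 2)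
    else
      bsearchB mjd ((lo + hi) / 2 + 1) hi
  else lo
termination_by hi - lo
decreasing_by all_goals omega

def leap_seconds_alt (mjd : Int) : Int := (bsearchB mjd 0 leapTableB.length : Int)

-- ===== PRECONDITION & SPEC =====
def Spec_leap_seconds (mjd : Int) (out : Int) : Prop := out = leap_seconds_alt mjd
instance (mjd : Int) (out : Int) : Decidable (Spec_leap_seconds mjd out) := by unfold Spec_leap_seconds; infer_instance

-- ===== CLAIM (what is proved, stated in full; the proofs are below) =====
def Claim_equal_leap_seconds : Prop := ∀ (mjd : Int), Dom_leap_seconds mjd → Spec_leap_seconds mjd (leap_seconds mjd)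

-- ===== LEMMAS AND PROOFS =====

-- number of table entries ≤ mjd, as a takeWhile-prefix length
def cntLeap (mjd : Int) : Nat := (leapTableB.takeWhile (fun t => t ≤ mjd)).length

-- A's loop counts the ≤-prefix of the list it scans
theorem loopA_eq_takeWhile (mjd : Int) (L : List Int) (ii : Int) :
    loopA mjd L ii = ii + ((L.takeWhile (fun t => t ≤ mjd)).length : Int) := by
  induction L generalizing ii with
  | nil => simp [loopA]
  | cons t ts ih =>
    by_cases h : mjd < t
    · simp [loopA, h, show ¬ (t ≤ mjd) by omega]
    · simp only [loopA, if_neg h, ih, List.takeWhile_cons,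
        show (decide (t ≤ mjd)) = true by simp; omega, if_pos, List.length_cons]
      push_cast
      ring

-- indices inside the takeWhile prefix satisfy the predicate (generic)
theorem takeWhile_getD {p : Int → Bool} :
    ∀ (L : List Int) (i : Nat), i < (L.takeWhile p).length → p (L.getD i 0) = true := by
  intro L
  induction L with
  | nil => intro i h; simp [List.takeWhile] at h
  | cons a L ih =>
    intro i h
    by_cases hp : p a = true
    · cases i with
      | zero => simpa using hp
      | succ j =>
        simp only [List.takeWhile_cons, hp, if_pos, List.length_cons] at h
        simpa using ih j (by omega)
    · simp [hp] at h
-- the first index past the takeWhile prefix fails the predicate (generic)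
theorem takeWhile_first_fail {p : Int → Bool} :
    ∀ (L : List Int), (L.takeWhile p).length < L.length →
      p (L.getD (L.takeWhile p).length 0) = false := by
  intro L
  induction L with
  | nil => intro h; simp at h
  | cons a L ih =>
    intro h
    by_cases hp : p a = true
    · simp only [List.takeWhile_cons, hp, if_pos, List.length_cons] at h ⊢
      simpa using ih (by omega)
    · simp [hp] at h ⊢

-- the table is sorted
theorem leapTableB_sorted : List.Pairwise (· ≤ ·) leapTableB := by decide

theorem leapTableB_mono {i j : Nat} (hij : i ≤ j) (hj : j < leapTableB.length) :
    leapTableB.getD i 0 ≤ leapTableB.getD j 0 := by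
  rcases Nat.lt_or_ge i j with h | h
  · have := (List.pairwise_iff_getElem.mp leapTableB_sorted) i j (by omega) hj h
    rwa [List.getD_eq_getElem _ _ (by omega), List.getD_eq_getElem _ _ hj]
  · have : i = j := by omega
    subst this; exact le_refl _

-- invariant: if cntLeap mjd lies in [lo, hi] and hi is in range, the search returns it
theorem bsearchB_eq (mjd : Int) (lo hi : Nat)
    (h1 : lo ≤ cntLeap mjd) (h2 : cntLeap mjd ≤ hi) (h3 : hi ≤ leapTableB.length) :
    bsearchB mjd lo hi = cntLeap mjd := by
  fun_induction bsearchB mjd lo hi with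
  | case1 lo hi hlt hcmp ih =>
    apply ih h1 ?_ (by omega)
    · -- mjd < table[(lo+hi)/2] forces cnt ≤ mid
      by_contra hc
      have hmid : (lo + hi) / 2 < (leapTableB.takeWhile (fun t => t ≤ mjd)).length := by
        unfold cntLeap at hc; omega
      have := takeWhile_getD leapTableB _ hmid
      simp [List.getD] at this
      simp [List.getD] at hcmp
      omega
  | case2 lo hi hlt hcmp ih =>
    apply ih ?_ h2 h3
    · -- table[(lo+hi)/2] ≤ mjd forces mid+1 ≤ cnt
      by_contra hc
      have hcnt : cntLeap mjd < leapTableB.length := by omega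
      have hfail := takeWhile_first_fail leapTableB hcnt
      have hmono := leapTableB_mono (i := cntLeap mjd) (j := (lo + hi) / 2)
        (by omega) (by omega)
      unfold cntLeap at hfail hmono hc
      simp [List.getD] at hfail hcmp hmono
      omega
  | case3 lo hi hlt => omega

-- takeWhile never lengthens a list
theorem takeWhile_len_le {p : Int → Bool} : ∀ (L : List Int), (L.takeWhile p).length ≤ L.length := by
  intro L
  induction L with
  | nil => simp
  | cons a L ih =>
    by_cases hp : p a = true <;> simp [hp] <;> omega

-- ===== VERDICT (by name: the statement is the Claim_ definition above) =====
theorem leap_seconds_spec : Claim_equal_leap_seconds := by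
  intro mjd _
  unfold Spec_leap_seconds leap_seconds leap_seconds_alt
  have hA : leaptimesA = leapTableB := rfl
  rw [hA, loopA_eq_takeWhile,
    bsearchB_eq mjd 0 leapTableB.length (Nat.zero_le _)
      (takeWhile_len_le _) (le_refl _)]
  simp [cntLeap]
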